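-- pv_equiv track=rewrite | github.com/jraymondli/usaco-1 | December 2016 Prob 2/2016_December_1_BlockGame.py | letters_in_pair
-- ===== SOURCE A (Python) =====
-- alphabet = list("abcdefghijklmnopqrstuvwxyz")
--
-- def letters_in_pair(input_list):
--     word1 = list(input_list[0])
--     word2 = list(input_list[1])
--     total = ""
--     for let in alphabet:
--         one = word1.count(let)
--         two = word2.count(let)
--         total += max(one, two)*let
--     return total
-- ===== SOURCE B (Python) =====
-- ALPHABET = "abcdefghijklmnopqrstuvwxyz"
--
-- def letters_in_pair(input_list):
--     # sort the lowercase letters of each word, then take the sorted multiset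
--     # union (per-letter max) with a two-pointer merge
--     xs = sorted(c for c in input_list[0] if c in ALPHABET)
--     ys = sorted(c for c in input_list[1] if c in ALPHABET)
--     out = []
--     i = j = 0
--     while i < len(xs) and j < len(ys):
--         if xs[i] == ys[j]:
--             out.append(xs[i])
--             i += 1
--             j += 1
--         elif xs[i] < ys[j]:
--             out.append(xs[i])
--             i += 1
--         else:
--             out.append(ys[j])
--             j += 1
--     out.extend(xs[i:])
--     out.extend(ys[j:])
--     return "".join(out)
-- ===== Notes on version B (the rewrite author's own statement) =====
-- stated objective: alternative
-- what changed: B sorts the lowercase letters of each word and computes the per-letter-max multiset union with a single two-pointer merge of the two sorted lists, instead of A's 26 repeated list.count scans over both words concatenated alphabet-letter by letter.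
import Mathlib
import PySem

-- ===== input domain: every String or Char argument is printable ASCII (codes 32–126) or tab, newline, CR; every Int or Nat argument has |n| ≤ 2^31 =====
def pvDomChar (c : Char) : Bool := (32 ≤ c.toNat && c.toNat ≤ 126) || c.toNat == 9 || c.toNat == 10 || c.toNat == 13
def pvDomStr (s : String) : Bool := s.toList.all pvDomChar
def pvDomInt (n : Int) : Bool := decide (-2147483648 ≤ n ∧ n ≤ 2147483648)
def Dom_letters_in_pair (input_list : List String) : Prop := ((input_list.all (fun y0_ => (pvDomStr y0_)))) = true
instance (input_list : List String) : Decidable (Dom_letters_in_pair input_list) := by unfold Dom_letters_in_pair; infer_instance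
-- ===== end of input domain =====

-- B sorts the lowercase letters of each word and merges the two sorted lists with a
-- two-pointer pass (sorted multiset union = per-letter max), replacing A's 26 list.count
-- scans (objective: alternative algorithm).

-- ===== PORT A =====
-- alphabet = list("abcdefghijklmnopqrstuvwxyz")
def pvAlphabet : List Char := "abcdefghijklmnopqrstuvwxyz".toList

def letters_in_pair (input_list : List String) : String :=
  let word1 := (PySem.List.pyGetD input_list 0 "").toList
  let word2 := (PySem.List.pyGetD input_list 1 "").toList
  let total := pvAlphabet.foldl
    (fun total lt =>
      let one := word1.count lt
      let two := word2.count lt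
      total ++ List.replicate (max one two) lt) ([] : List Char)
  String.ofList total

-- ===== PORT B =====
-- the two-pointer while loop of Source B, transcribed as recursion on the two suffixes
def pvMerge : List Char → List Char → List Char
  | [], ys => ys
  | x :: xs, [] => x :: xs
  | x :: xs, y :: ys =>
      if x = y then x :: pvMerge xs ys
      else if x < y then x :: pvMerge xs (y :: ys)
      else y :: pvMerge (x :: xs) ys
  termination_by xs ys => xs.length + ys.length

def letters_in_pair_alt (input_list : List String) : String :=
  let xs := PySem.List.sorted
    ((PySem.List.pyGetD input_list 0 "").toList.filter (fun c => c ∈ "abcdefghijklmnopqrstuvwxyz".toList))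
    (fun x => x) false
  let ys := PySem.List.sorted
    ((PySem.List.pyGetD input_list 1 "").toList.filter (fun c => c ∈ "abcdefghijklmnopqrstuvwxyz".toList))
    (fun x => x) false
  String.ofList (pvMerge xs ys)

-- ===== PRECONDITION & SPEC =====
-- A indexes input_list[0] and input_list[1]: it raises IndexError on lists of fewer than 2 strings.
def Pre_letters_in_pair (input_list : List String) : Prop := 2 ≤ input_list.length
instance (input_list : List String) : Decidable (Pre_letters_in_pair input_list) := by
  unfold Pre_letters_in_pair; infer_instance

def pvWitness_letters_in_pair : List String := ["banana", "cab"]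

def Spec_letters_in_pair (input_list : List String) (out : String) : Prop := out = letters_in_pair_alt input_list
instance (input_list : List String) (out : String) : Decidable (Spec_letters_in_pair input_list out) := by unfold Spec_letters_in_pair; infer_instance

-- ===== CLAIM (what is proved, stated in full; the proofs are below) =====
def Claim_equal_letters_in_pair : Prop := ∀ (input_list : List String), Dom_letters_in_pair input_list → Pre_letters_in_pair input_list → Spec_letters_in_pair input_list (letters_in_pair input_list)

-- ===== LEMMAS AND PROOFS =====

lemma pv_head_le {y : Char} {ys : List Char} (h : (y :: ys).Pairwise (· ≤ ·)) :
    ∀ z ∈ y :: ys, y ≤ z := by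
  intro z hz
  rcases List.mem_cons.mp hz with rfl | hz'
  · exact le_refl _
  · exact (List.pairwise_cons.mp h).1 z hz'

lemma pvMerge_nil (ys : List Char) : pvMerge [] ys = ys := by simp [pvMerge]

lemma pvMerge_cons_nil (x : Char) (xs : List Char) : pvMerge (x :: xs) [] = x :: xs := by
  simp [pvMerge]

lemma pvMerge_eq (x : Char) (xs ys : List Char) :
    pvMerge (x :: xs) (x :: ys) = x :: pvMerge xs ys := by simp [pvMerge]

lemma pvMerge_lt {x y : Char} (hne : ¬ x = y) (hlt : x < y) (xs ys : List Char) :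
    pvMerge (x :: xs) (y :: ys) = x :: pvMerge xs (y :: ys) := by simp [pvMerge, hne, hlt]

lemma pvMerge_gt {x y : Char} (hne : ¬ x = y) (hge : ¬ x < y) (xs ys : List Char) :
    pvMerge (x :: xs) (y :: ys) = y :: pvMerge (x :: xs) ys := by simp [pvMerge, hne, hge]

lemma pvMerge_mem : ∀ (xs ys : List Char) (z : Char), z ∈ pvMerge xs ys → z ∈ xs ∨ z ∈ ys := by
  intro xs ys
  induction xs, ys using pvMerge.induct with
  | case1 ys => intro z h; rw [pvMerge_nil] at h; exact Or.inr h
  | case2 x xs => intro z h; rw [pvMerge_cons_nil] at h; exact Or.inl h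
  | case3 xs y ys ih =>
      intro z h
      rw [pvMerge_eq] at h
      rcases List.mem_cons.mp h with rfl | h'
      · exact Or.inl List.mem_cons_self
      · rcases ih z h' with h1 | h1
        · exact Or.inl (List.mem_cons_of_mem _ h1)
        · exact Or.inr (List.mem_cons_of_mem _ h1)
  | case4 x xs y ys hne hlt ih =>
      intro z h
      rw [pvMerge_lt hne hlt] at h
      rcases List.mem_cons.mp h with rfl | h'
      · exact Or.inl List.mem_cons_self
      · rcases ih z h' with h1 | h1
        · exact Or.inl (List.mem_cons_of_mem _ h1)
        · exact Or.inr h1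
  | case5 x xs y ys hne hge ih =>
      intro z h
      rw [pvMerge_gt hne hge] at h
      rcases List.mem_cons.mp h with rfl | h'
      · exact Or.inr List.mem_cons_self
      · rcases ih z h' with h1 | h1
        · exact Or.inl h1
        · exact Or.inr (List.mem_cons_of_mem _ h1)

lemma pvMerge_sorted : ∀ (xs ys : List Char),
    xs.Pairwise (· ≤ ·) → ys.Pairwise (· ≤ ·) → (pvMerge xs ys).Pairwise (· ≤ ·) := by
  intro xs ys
  induction xs, ys using pvMerge.induct with
  | case1 ys => intro _ hy; rw [pvMerge_nil]; exact hy
  | case2 x xs => intro hx _; rw [pvMerge_cons_nil]; exact hx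
  | case3 xs y ys ih =>
      intro hx hy
      rw [pvMerge_eq]
      refine List.pairwise_cons.mpr ⟨?_, ih (List.pairwise_cons.mp hx).2 (List.pairwise_cons.mp hy).2⟩
      intro z hz
      rcases pvMerge_mem _ _ z hz with h1 | h1
      · exact (List.pairwise_cons.mp hx).1 z h1
      · exact (List.pairwise_cons.mp hy).1 z h1
  | case4 x xs y ys hne hlt ih =>
      intro hx hy
      rw [pvMerge_lt hne hlt]
      refine List.pairwise_cons.mpr ⟨?_, ih (List.pairwise_cons.mp hx).2 hy⟩
      intro z hz
      rcases pvMerge_mem _ _ z hz with h1 | h1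
      · exact (List.pairwise_cons.mp hx).1 z h1
      · exact le_of_lt (lt_of_lt_of_le hlt (pv_head_le hy z h1))
  | case5 x xs y ys hne hge ih =>
      intro hx hy
      rw [pvMerge_gt hne hge]
      have hyx : y < x := lt_of_le_of_ne (le_of_not_gt hge) (fun h => hne h.symm)
      refine List.pairwise_cons.mpr ⟨?_, ih hx (List.pairwise_cons.mp hy).2⟩
      intro z hz
      rcases pvMerge_mem _ _ z hz with h1 | h1
      · exact le_of_lt (lt_of_lt_of_le hyx (pv_head_le hx z h1))
      · exact (List.pairwise_cons.mp hy).1 z h1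

lemma pvMerge_count : ∀ (xs ys : List Char),
    xs.Pairwise (· ≤ ·) → ys.Pairwise (· ≤ ·) → ∀ c : Char,
    (pvMerge xs ys).count c = max (xs.count c) (ys.count c) := by
  intro xs ys
  induction xs, ys using pvMerge.induct with
  | case1 ys => intro _ _ c; rw [pvMerge_nil]; simp
  | case2 x xs => intro _ _ c; rw [pvMerge_cons_nil]; simp
  | case3 xs y ys ih =>
      intro hx hy c
      have ihc := ih (List.pairwise_cons.mp hx).2 (List.pairwise_cons.mp hy).2 c
      rw [pvMerge_eq]
      simp only [List.count_cons, ihc]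
      by_cases hyc : (y == c) = true <;> simp [hyc] <;> omega
  | case4 x xs y ys hne hlt ih =>
      intro hx hy c
      have ihc := ih (List.pairwise_cons.mp hx).2 hy c
      have hcase : x = c → (y :: ys).count c = 0 := by
        intro hxc
        refine List.count_eq_zero.mpr ?_
        intro hmem
        subst hxc
        exact absurd (lt_of_lt_of_le hlt (pv_head_le hy x hmem)) (lt_irrefl x)
      rw [pvMerge_lt hne hlt]
      simp only [List.count_cons] at ihc ⊢
      rw [ihc]
      by_cases hxc : x = c
      · have h0 := hcase hxc
        simp only [List.count_cons] at h0
        rw [h0, if_pos (show (x == c) = true by simp [hxc])]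
        omega
      · rw [if_neg (show ¬ (x == c) = true by simp [hxc])]
        omega
  | case5 x xs y ys hne hge ih =>
      intro hx hy c
      have hyx : y < x := lt_of_le_of_ne (le_of_not_gt hge) (fun h => hne h.symm)
      have ihc := ih hx (List.pairwise_cons.mp hy).2 c
      have hcase : y = c → (x :: xs).count c = 0 := by
        intro hyc
        refine List.count_eq_zero.mpr ?_
        intro hmem
        subst hyc
        exact absurd (lt_of_lt_of_le hyx (pv_head_le hx y hmem)) (lt_irrefl y)
      rw [pvMerge_gt hne hge]
      simp only [List.count_cons] at ihc ⊢
      rw [ihc]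
      by_cases hyc : y = c
      · have h0 := hcase hyc
        simp only [List.count_cons] at h0
        rw [h0, if_pos (show (y == c) = true by simp [hyc])]
        omega
      · rw [if_neg (show ¬ (y == c) = true by simp [hyc])]
        omega

-- the flatMap A builds is sorted …
lemma pv_flat_sorted (n : Char → ℕ) : ∀ l : List Char, l.Pairwise (· < ·) →
    (l.flatMap fun c => List.replicate (n c) c).Pairwise (· ≤ ·) := by
  intro l
  induction l with
  | nil => intro _; simp
  | cons c t ih =>
      intro h
      simp only [List.flatMap_cons]
      refine List.pairwise_append.mpr ⟨?_, ih (List.pairwise_cons.mp h).2, ?_⟩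
      · exact List.pairwise_replicate.mpr (Or.inr (le_refl c))
      · intro a ha b hb
        have ha' : a = c := (List.eq_of_mem_replicate ha)
        rcases List.mem_flatMap.mp hb with ⟨d, hd, hbd⟩
        have hb' : b = d := List.eq_of_mem_replicate hbd
        subst ha'; subst hb'
        exact le_of_lt ((List.pairwise_cons.mp h).1 b hd)

-- … and counts each key its replicate length (keys distinct)
lemma pv_flat_count (n : Char → ℕ) : ∀ l : List Char, l.Nodup → ∀ d : Char,
    (l.flatMap fun c => List.replicate (n c) c).count d = if d ∈ l then n d else 0 := by
  intro l
  induction l with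
  | nil => intro _ d; simp
  | cons c t ih =>
      intro h d
      simp only [List.flatMap_cons, List.count_append, List.count_replicate,
        ih (List.nodup_cons.mp h).2 d, List.mem_cons]
      by_cases hdc : d = c
      · subst hdc
        simp [(List.nodup_cons.mp h).1]
      · have hcd : ¬ c = d := fun h' => hdc h'.symm
        simp [hdc, hcd]

lemma pv_sorted_count (l : List Char) (c : Char) :
    (PySem.List.sorted l (fun x => x) false).count c = l.count c :=
  (PySem.List.sorted_perm l (fun x => x) false).count_eq c

lemma pv_filter_count (l : List Char) (p : Char → Bool) (c : Char) :
    (l.filter p).count c = if p c then l.count c else 0 := by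
  by_cases h : p c
  · simp [List.count_filter, h]
  · simp only [h]
    refine List.count_eq_zero.mpr ?_
    intro hmem
    exact h (List.of_mem_filter hmem)

lemma pv_ports_agree (input_list : List String) :
    letters_in_pair input_list = letters_in_pair_alt input_list := by
  show String.ofList _ = String.ofList _
  rw [PySem.List.foldl_append_eq_flatMap]
  simp only [List.nil_append]
  congr 1
  set w1 := (PySem.List.pyGetD input_list 0 "").toList with hw1
  set w2 := (PySem.List.pyGetD input_list 1 "").toList with hw2
  set p : Char → Bool := fun c => decide (c ∈ "abcdefghijklmnopqrstuvwxyz".toList) with hp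
  set f1 := PySem.List.sorted (w1.filter p) (fun x => x) false with hf1
  set f2 := PySem.List.sorted (w2.filter p) (fun x => x) false with hf2
  have hs1 : f1.Pairwise (· ≤ ·) := by
    simpa using PySem.List.sorted_pairwise (w1.filter p) (fun x => x)
  have hs2 : f2.Pairwise (· ≤ ·) := by
    simpa using PySem.List.sorted_pairwise (w2.filter p) (fun x => x)
  have halpha_lt : pvAlphabet.Pairwise (· < ·) := by decide
  have halpha_nd : pvAlphabet.Nodup := by decide
  have hA : (pvAlphabet.flatMap fun c =>
      List.replicate (max (w1.count c) (w2.count c)) c).Pairwise (· ≤ ·) :=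
    pv_flat_sorted _ pvAlphabet halpha_lt
  have hB : (pvMerge f1 f2).Pairwise (· ≤ ·) := pvMerge_sorted f1 f2 hs1 hs2
  have hcount : ∀ c : Char,
      (pvAlphabet.flatMap fun c => List.replicate (max (w1.count c) (w2.count c)) c).count c
        = (pvMerge f1 f2).count c := by
    intro c
    rw [pvMerge_count f1 f2 hs1 hs2 c, pv_flat_count _ pvAlphabet halpha_nd c]
    rw [hf1, hf2, pv_sorted_count, pv_sorted_count, pv_filter_count, pv_filter_count]
    have hmem : (c ∈ pvAlphabet) ↔ (p c = true) := by
      simp [hp, pvAlphabet]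
    by_cases hc : c ∈ pvAlphabet
    · simp [hc, hmem.mp hc]
    · have hpc : ¬ (p c = true) := fun h => hc (hmem.mpr h)
      simp [hc, hpc]
  have hperm : (pvAlphabet.flatMap fun c =>
      List.replicate (max (w1.count c) (w2.count c)) c).Perm (pvMerge f1 f2) :=
    List.perm_iff_count.mpr hcount
  exact List.Perm.eq_of_pairwise (fun a b _ _ h1 h2 => le_antisymm h1 h2) hA hB hperm

-- ===== VERDICT (by name: the statement is the Claim_ definition above) =====
theorem letters_in_pair_spec : Claim_equal_letters_in_pair := by
  intro input_list _ _
  unfold Spec_letters_in_pair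
  exact pv_ports_agree input_list
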